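-- pv_equiv track=rewrite | github.com/daniel-reich/ubiquitous-fiesta | oaN8o42vuzsdnCf4x_13.py | best_words
-- ===== SOURCE A (Python) =====
-- def best_words(lst):
--   d={'A':1,'B':3,'C':3,'D':2,'E':1,'F':4,'G':2,'H':4,'I':1,'J':8,'K':5,'L':2,'M':3,'N':1,'O':1,'P':3,'Q':10,'R':1,'S':1,'T':1,'U':1,'V':4,'W':4,'X':8,'Y':4,'Z':10}
--   currMx=-1
--   resLst=[]
--   for s in lst:
--     score=0
--     for c in s:
--       score+=d[c.upper()]
--     if score>currMx:
--       currMx=score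
--       resLst=[s]
--     elif score==currMx:
--       resLst.append(s)
--   return resLst
-- ===== SOURCE B (Python) =====
-- def best_words(lst):
--   d={'A':1,'B':3,'C':3,'D':2,'E':1,'F':4,'G':2,'H':4,'I':1,'J':8,'K':5,'L':2,'M':3,'N':1,'O':1,'P':3,'Q':10,'R':1,'S':1,'T':1,'U':1,'V':4,'W':4,'X':8,'Y':4,'Z':10}
--   if not lst:
--     return []
--   scores = [sum(d[c.upper()] for c in s) for s in lst]
--   m = max(scores)
--   return [s for s, sc in zip(lst, scores) if sc == m]
-- ===== Notes on version B (the rewrite author's own statement) =====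
-- stated objective: simpler
-- what changed: Replaces A's single fused pass maintaining a running maximum and a rebuilt/append result list with a build-scores, take-max, then-filter decomposition.
import Mathlib
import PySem

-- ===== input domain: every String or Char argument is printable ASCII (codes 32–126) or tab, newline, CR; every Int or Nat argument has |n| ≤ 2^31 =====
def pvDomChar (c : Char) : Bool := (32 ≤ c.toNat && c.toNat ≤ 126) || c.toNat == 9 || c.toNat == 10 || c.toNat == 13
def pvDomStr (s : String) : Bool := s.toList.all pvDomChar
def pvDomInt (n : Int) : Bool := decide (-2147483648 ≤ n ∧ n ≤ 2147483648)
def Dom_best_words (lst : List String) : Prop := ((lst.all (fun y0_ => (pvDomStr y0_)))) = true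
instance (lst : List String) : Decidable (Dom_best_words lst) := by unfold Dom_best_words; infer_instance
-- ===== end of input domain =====

-- B restructures A's fused running-maximum pass into scores-table / max / filter (objective: simpler decomposition).

-- ===== PORT A =====
-- the letter table d; d[c.upper()] → letterScore c.toUpper (0 for a missing key is
-- unreachable under Pre_best_words, which excludes exactly Python's KeyError inputs)
def letterScore (c : Char) : Int :=
  match c with
  | 'A' => 1 | 'B' => 3 | 'C' => 3 | 'D' => 2 | 'E' => 1 | 'F' => 4 | 'G' => 2
  | 'H' => 4 | 'I' => 1 | 'J' => 8 | 'K' => 5 | 'L' => 2 | 'M' => 3 | 'N' => 1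
  | 'O' => 1 | 'P' => 3 | 'Q' => 10 | 'R' => 1 | 'S' => 1 | 'T' => 1 | 'U' => 1
  | 'V' => 4 | 'W' => 4 | 'X' => 8 | 'Y' => 4 | 'Z' => 10
  | _ => 0

-- inner loop: score = 0; for c in s: score += d[c.upper()]
def wordScoreA (s : String) : Int :=
  s.toList.foldl (fun score c => score + letterScore c.toUpper) 0

-- outer loop body on state (currMx, resLst)
def stepA (st : Int × List String) (s : String) : Int × List String :=
  let score := wordScoreA s
  if score > st.1 then (score, [s])
  else if score = st.1 then (st.1, st.2 ++ [s])
  else st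

def best_words (lst : List String) : List String :=
  (lst.foldl stepA (-1, [])).2

-- ===== PORT B =====
-- sum(d[c.upper()] for c in s)
def wordScoreB (s : String) : Int :=
  (s.toList.map (fun c => letterScore c.toUpper)).sum

def best_words_alt (lst : List String) : List String :=
  match lst with
  | [] => []
  | _ :: _ =>
    let scores := lst.map wordScoreB
    match PySem.List.max? scores (fun x => x) with   -- m = max(scores), nonempty here
    | none => []
    | some m => ((lst.zip scores).filter (fun p => p.2 == m)).map (fun p => p.1)

-- ===== PRECONDITION & SPEC =====
-- Pre_ excludes exactly the inputs on which Python A raises KeyError: a word containing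
-- a character whose upper-case is not an ASCII letter A–Z.
def Pre_best_words (lst : List String) : Prop :=
  (lst.all (fun s => s.toList.all (fun c =>
    ('a' ≤ c && c ≤ 'z') || ('A' ≤ c && c ≤ 'Z')))) = true
instance (lst : List String) : Decidable (Pre_best_words lst) := by
  unfold Pre_best_words; infer_instance
def pvWitness_best_words : List String := ["aZ"]

def Spec_best_words (lst : List String) (out : List String) : Prop := out = best_words_alt lst
instance (lst : List String) (out : List String) : Decidable (Spec_best_words lst out) := by
  unfold Spec_best_words; infer_instance

-- ===== CLAIM (what is proved, stated in full; the proofs are below) =====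
def Claim_equal_best_words : Prop :=
  ∀ (lst : List String), Dom_best_words lst → Pre_best_words lst → Spec_best_words lst (best_words lst)

-- ===== LEMMAS AND PROOFS =====

theorem letterScore_nonneg (c : Char) : 0 ≤ letterScore c := by
  unfold letterScore
  split <;> norm_num

theorem wordScore_eq (s : String) : wordScoreA s = wordScoreB s := by
  unfold wordScoreA wordScoreB
  rw [List.sum_eq_foldl, List.foldl_map]

theorem wordScoreA_nonneg (s : String) : 0 ≤ wordScoreA s := by
  rw [wordScore_eq]
  unfold wordScoreB
  apply List.sum_nonneg
  intro x hx
  obtain ⟨c, _, rfl⟩ := List.mem_map.mp hx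
  exact letterScore_nonneg _

-- running max of scores
def runMax (lst : List String) (m : Int) : Int :=
  lst.foldl (fun m s => max m (wordScoreA s)) m

theorem le_runMax (lst : List String) (m : Int) : m ≤ runMax lst m := by
  induction lst generalizing m with
  | nil => simp [runMax]
  | cons s t ih =>
    simp only [runMax, List.foldl_cons] at *
    exact le_trans (le_max_left _ _) (ih _)

-- characterisation of A's fused loop
theorem foldA_char (lst : List String) (m : Int) (res : List String) :
    lst.foldl stepA (m, res) =
      (runMax lst m,
       (if runMax lst m = m then res else []) ++ lst.filter (fun s => wordScoreA s == runMax lst m)) := by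
  induction lst generalizing m res with
  | nil => simp [runMax]
  | cons s t ih =>
    have hmax : runMax (s :: t) m = runMax t (max m (wordScoreA s)) := by
      simp [runMax]
    rw [List.foldl_cons]
    by_cases h1 : wordScoreA s > m
    · have hs : stepA (m, res) s = (wordScoreA s, [s]) := by
        simp [stepA, h1]
      have hM : runMax (s :: t) m = runMax t (wordScoreA s) := by
        rw [hmax, max_eq_right (le_of_lt h1)]
      have hne : runMax (s :: t) m ≠ m := by
        rw [hM]
        have := le_runMax t (wordScoreA s)
        omega
      have hsm : wordScoreA s ≠ m := ne_of_gt h1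
      have hMm : runMax t (wordScoreA s) ≠ m := by rw [← hM]; exact hne
      rw [hs, ih, hM]
      by_cases hc : runMax t (wordScoreA s) = wordScoreA s
      · simp [hc, hsm, hMm]
      · simp [hc, hsm, hMm, Ne.symm hc]
    · by_cases h2 : wordScoreA s = m
      · have hs : stepA (m, res) s = (m, res ++ [s]) := by
          simp [stepA, h1, h2]
        have hM : runMax (s :: t) m = runMax t m := by
          rw [hmax, h2, max_self]
        rw [hs, ih, hM]
        by_cases hc : runMax t m = m
        · simp [List.filter_cons, hc, h2]
        · have : ¬ (wordScoreA s == runMax t m) = true := by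
            simp [h2]; exact fun h => hc h.symm
          simp [List.filter_cons, hc, this]
      · have h3 : wordScoreA s < m := by omega
        have hs : stepA (m, res) s = (m, res) := by
          simp [stepA, h1, h2]
        have hM : runMax (s :: t) m = runMax t m := by
          rw [hmax, max_eq_left (le_of_lt h3)]
        have hlt : wordScoreA s ≠ runMax t m := by
          have := le_runMax t m
          omega
        rw [hs, ih, hM]
        simp [List.filter_cons, hlt]

-- B's zip-scores-filter-project collapses to a plain filter
theorem zip_map_filter (l : List String) (f : String → Int) (m : Int) :
    (((l.zip (l.map f)).filter (fun p => p.2 == m)).map (fun p => p.1)) =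
      l.filter (fun s => f s == m) := by
  induction l with
  | nil => simp
  | cons x t ih =>
    simp only [List.map_cons, List.zip_cons_cons, List.filter_cons]
    by_cases h : (f x == m) = true
    · simp only [h, if_pos rfl]
      simp [ih, h]
    · simp only [h]
      simp [ih, h]

-- ===== VERDICT (by name: the statement is the Claim_ definition above) =====
theorem best_words_spec : Claim_equal_best_words := by
  intro lst _ _
  unfold Spec_best_words
  match lst with
  | [] => simp [best_words, best_words_alt]
  | s :: t =>
    have hmapeq : (s :: t).map wordScoreB = (s :: t).map wordScoreA := by
      simp [wordScore_eq]
    have hA : best_words (s :: t) =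
        (s :: t).filter (fun x => wordScoreA x == runMax t (wordScoreA s)) := by
      unfold best_words
      rw [foldA_char]
      have hM : runMax (s :: t) (-1) = runMax t (wordScoreA s) := by
        have : max (-1 : Int) (wordScoreA s) = wordScoreA s :=
          max_eq_right (by have := wordScoreA_nonneg s; omega)
        simp [runMax, this]
      have hne : runMax (s :: t) (-1) ≠ -1 := by
        rw [hM]
        have h1 := le_runMax t (wordScoreA s)
        have h2 := wordScoreA_nonneg s
        omega
      simp [hne, hM]
    have hB : best_words_alt (s :: t) =
        (s :: t).filter (fun x => wordScoreA x == runMax t (wordScoreA s)) := by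
      unfold best_words_alt
      simp only [hmapeq, List.map_cons]
      rw [PySem.List.max?_id_cons]
      have : (t.map wordScoreA).foldl max (wordScoreA s) = runMax t (wordScoreA s) := by
        simp [runMax, List.foldl_map]
      rw [this]
      exact zip_map_filter (s :: t) wordScoreA (runMax t (wordScoreA s))
    rw [hA, hB]
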